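-- pv_equiv track=rewrite | github.com/rahulswimmer/scalar_assignments_hw | reversepairs.py | solve
-- ===== SOURCE A (Python) =====
-- def solve(A):
--     A.sort()
--     count = 0
--
--     i = 0
--     j = len(A)-1
--
--     while i < len(A) and j < len(A):
--         if A[i] > 2*A[j]:
--             count +=1
--         i += 1
--         j -= 1
--
--     return count
-- ===== SOURCE B (Python) =====
-- def solve(A):
--     A.sort()
--     n = len(A)
--     lo, hi = 0, n
--     while lo < hi:
--         mid = (lo + hi) // 2
--         if A[mid] > 2 * A[n - 1 - mid]:
--             hi = mid
--         else:
--             lo = mid + 1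
--     return n - lo
-- ===== Notes on version B (the rewrite author's own statement) =====
-- stated objective: faster
-- what changed: After sorting, the counted condition A[i] > 2*A[n-1-i] is monotone in i, so B binary-searches for the first index where it holds and returns n minus it, replacing A's linear counting scan with an O(log n) search (both still sort first and mutate A in place).
import Mathlib
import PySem

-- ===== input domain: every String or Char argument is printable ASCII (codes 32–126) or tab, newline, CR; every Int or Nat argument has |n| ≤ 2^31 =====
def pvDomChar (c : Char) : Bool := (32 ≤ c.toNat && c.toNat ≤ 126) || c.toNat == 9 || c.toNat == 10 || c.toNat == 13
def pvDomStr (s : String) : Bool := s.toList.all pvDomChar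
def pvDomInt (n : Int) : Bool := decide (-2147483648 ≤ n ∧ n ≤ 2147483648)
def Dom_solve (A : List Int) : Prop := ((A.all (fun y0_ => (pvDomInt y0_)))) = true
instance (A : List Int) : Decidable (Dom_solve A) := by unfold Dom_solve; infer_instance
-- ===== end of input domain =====

-- B replaces A's linear counting scan (after the sort) with a binary search for the first index
-- where sorted[i] > 2*sorted[n-1-i]; both Pythons sort A in place, the claim is about the return value.

-- ===== PORT A =====
-- A's while loop: i goes 0..n-1 and j = n-1-i (the 'j < len(A)' conjunct is then always true,
-- and both indices are in range, so A[i]/A[j] are ported as getD).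
def solveGo (s : List Int) (i : Nat) (count : Int) : Int :=
  if i < s.length then
    solveGo s (i + 1)
      (if s.getD i 0 > 2 * s.getD (s.length - 1 - i) 0 then count + 1 else count)
  else count
termination_by s.length - i

def solve (A : List Int) : Int := solveGo (PySem.List.sorted A (fun x => x) false) 0 0

-- ===== PORT B =====
-- Source B's binary-search loop; lo/hi stay in [0, n] so Nat floor division matches Python's '//'.
def bsGo (s : List Int) (lo hi : Nat) : Nat :=
  if lo < hi then
    let mid := (lo + hi) / 2
    if s.getD mid 0 > 2 * s.getD (s.length - 1 - mid) 0 then bsGo s lo mid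
    else bsGo s (mid + 1) hi
  else lo
termination_by hi - lo

def solve_alt (A : List Int) : Int :=
  let s := PySem.List.sorted A (fun x => x) false
  ((s.length - bsGo s 0 s.length : Nat) : Int)

-- ===== PRECONDITION & SPEC =====
def Spec_solve (A : List Int) (out : Int) : Prop := out = solve_alt A
instance (A : List Int) (out : Int) : Decidable (Spec_solve A out) := by unfold Spec_solve; infer_instance

-- ===== CLAIM (what is proved, stated in full; the proofs are below) =====
def Claim_equal_solve : Prop := ∀ (A : List Int), Dom_solve A → Spec_solve A (solve A)

-- ===== LEMMAS AND PROOFS =====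

-- the tested predicate
def pPred (s : List Int) (k : Nat) : Bool :=
  decide (s.getD k 0 > 2 * s.getD (s.length - 1 - k) 0)

-- monotonicity of the predicate on a sorted list
theorem pPred_mono (A : List Int) {k m : Nat} (hkm : k ≤ m)
    (hm : m < (PySem.List.sorted A (fun x => x) false).length)
    (hk : pPred (PySem.List.sorted A (fun x => x) false) k = true) :
    pPred (PySem.List.sorted A (fun x => x) false) m = true := by
  set s := PySem.List.sorted A (fun x => x) false with hs
  have hkn : k < s.length := lt_of_le_of_lt hkm hm
  have h1 : s.getD k 0 ≤ s.getD m 0 := by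
    rw [List.getD_eq_getElem _ _ hkn, List.getD_eq_getElem _ _ hm]
    exact PySem.List.sorted_id_getElem_mono A hkm hm
  have hmk : s.length - 1 - m ≤ s.length - 1 - k := by omega
  have hkb : s.length - 1 - k < s.length := by omega
  have h2 : s.getD (s.length - 1 - m) 0 ≤ s.getD (s.length - 1 - k) 0 := by
    rw [List.getD_eq_getElem _ _ (by omega : s.length - 1 - m < s.length),
        List.getD_eq_getElem _ _ hkb]
    exact PySem.List.sorted_id_getElem_mono A hmk hkb
  simp only [pPred, decide_eq_true_eq] at hk ⊢
  omega

-- binary search characterisation: given the invariants, bsGo returns a boundary index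
theorem bsGo_spec (s : List Int)
    (hmono : ∀ k m : Nat, k ≤ m → m < s.length → pPred s k = true → pPred s m = true) :
    ∀ d lo hi : Nat, hi - lo ≤ d → lo ≤ hi → hi ≤ s.length →
      (∀ k, k < lo → pPred s k = false) →
      (∀ k, hi ≤ k → k < s.length → pPred s k = true) →
      (∀ k, k < bsGo s lo hi → pPred s k = false) ∧
      (∀ k, bsGo s lo hi ≤ k → k < s.length → pPred s k = true) ∧
      bsGo s lo hi ≤ s.length := by
  intro d
  induction d with
  | zero =>
    intro lo hi hd hlh hhn hflo hthi
    have : ¬ lo < hi := by omega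
    rw [bsGo, if_neg this]
    have : lo = hi := by omega
    subst this
    exact ⟨hflo, hthi, by omega⟩
  | succ d ih =>
    intro lo hi hd hlh hhn hflo hthi
    rw [bsGo]
    by_cases h : lo < hi
    · simp only [if_pos h]
      set mid := (lo + hi) / 2 with hmid
      have hmlt : mid < hi := by omega
      have hmge : lo ≤ mid := by omega
      by_cases hp : s.getD mid 0 > 2 * s.getD (s.length - 1 - mid) 0
      · simp only [if_pos hp]
        have hpm : pPred s mid = true := by simp only [pPred]; exact decide_eq_true hp
        exact ih lo mid (by omega) (by omega) (by omega)
          hflo (fun k hk1 hk2 => hmono mid k hk1 hk2 hpm)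
      · simp only [if_neg hp]
        have hfm : ∀ k, k < mid + 1 → pPred s k = false := by
          intro k hk
          by_cases hkl : k < lo
          · exact hflo k hkl
          · by_contra hc
            have hkt : pPred s k = true := by
              cases hpk : pPred s k with
              | false => exact absurd hpk hc
              | true => rfl
            have : pPred s mid = true :=
              hmono k mid (by omega) (by omega) hkt
            rw [pPred, decide_eq_true_eq] at this
            exact hp this
        exact ih (mid + 1) hi (by omega) (by omega) hhn hfm hthi
    · simp only [if_neg h]
      have : lo = hi := by omega
      subst this
      exact ⟨hflo, hthi, by omega⟩

-- A's scan counts exactly n - max i r when r is the boundary index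
theorem solveGo_eq (s : List Int) (r : Nat) (hrn : r ≤ s.length)
    (hf : ∀ k, k < r → pPred s k = false)
    (ht : ∀ k, r ≤ k → k < s.length → pPred s k = true) :
    ∀ d i : Nat, ∀ c : Int, s.length - i ≤ d →
      solveGo s i c = c + ((s.length - max i r : Nat) : Int) := by
  intro d
  induction d with
  | zero =>
    intro i c hd
    have h : ¬ i < s.length := by omega
    rw [solveGo, if_neg h]
    have : s.length - max i r = 0 := by omega
    rw [this]; simp
  | succ d ih =>
    intro i c hd
    rw [solveGo]
    by_cases h : i < s.length
    · simp only [if_pos h]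
      rw [ih (i + 1) _ (by omega)]
      by_cases hir : i < r
      · have hpf := hf i hir
        rw [pPred] at hpf
        have hcond : ¬ s.getD i 0 > 2 * s.getD (s.length - 1 - i) 0 :=
          of_decide_eq_false hpf
        rw [if_neg hcond]
        have h1 : max i r = r := by omega
        have h2 : max (i + 1) r = r := by omega
        rw [h1, h2]
      · have hpt := ht i (by omega) h
        rw [pPred] at hpt
        have hcond : s.getD i 0 > 2 * s.getD (s.length - 1 - i) 0 :=
          of_decide_eq_true hpt
        rw [if_pos hcond]
        have h1 : max i r = i := by omega
        have h2 : max (i + 1) r = i + 1 := by omega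
        rw [h1, h2]
        have e1 : s.length - i = (s.length - (i + 1)) + 1 := by omega
        rw [e1]
        push_cast
        ring
    · simp only [if_neg h]
      have : s.length - max i r = 0 := by omega
      rw [this]; simp

theorem solve_spec_aux : ∀ (A : List Int), solve A = solve_alt A := by
  intro A
  set s := PySem.List.sorted A (fun x => x) false with hs
  have hmono := fun k m hkm hm hk => pPred_mono A (k := k) (m := m) hkm hm hk
  have hbs := bsGo_spec s hmono s.length 0 s.length (by omega) (by omega) (le_refl _)
    (fun k hk => absurd hk (by omega)) (fun k h1 h2 => absurd h1 (by omega))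
  obtain ⟨hf, ht, hle⟩ := hbs
  have := solveGo_eq s (bsGo s 0 s.length) hle hf ht s.length 0 0 (by omega)
  simp only [solve, solve_alt, ← hs] at *
  rw [this]
  simp

-- ===== VERDICT (by name: the statement is the Claim_ definition above) =====
theorem solve_spec : Claim_equal_solve := by
  intro A _
  exact solve_spec_aux A
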